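-- pv_equiv track=rewrite | github.com/minhquang251/Sudoku-Solver | Sudoku AI.py | generate_block
-- ===== SOURCE A (Python) =====
-- def generate_block(nth):
--     all_block = []
--     for i in range(0,7,3):
--         all_block.append(block_rule(i))
--     for i in range(27,34,3):
--         all_block.append(block_rule(i))
--     for i in range(54,61,3):
--         all_block.append(block_rule(i))
--     for sub_block in all_block:
--         if nth in sub_block:
--             return sorted(sub_block)
--
-- def block_rule(n):
--     array = []
--     for i in range(n,n+3):
--         array.append(i)
--         array.append(i+9)
--         array.append(i+18)
--     return sorted(array)
-- ===== SOURCE B (Python) =====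
-- def generate_block(nth):
--     # Compute the containing 3x3 block directly from nth instead of
--     # building all nine blocks and scanning them.
--     if not (0 <= nth <= 80):
--         return None
--     r, c = divmod(nth, 9)
--     corner = (r // 3) * 27 + (c // 3) * 3
--     cells = []
--     for i in range(corner, corner + 3):
--         cells.extend((i, i + 9, i + 18))
--     return sorted(cells)
-- ===== Notes on version B (the rewrite author's own statement) =====
-- stated objective: simpler
-- what changed: B computes the containing block's top-left corner arithmetically from nth and generates its nine cells, instead of constructing all nine blocks and scanning them for membership.
import Mathlib
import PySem

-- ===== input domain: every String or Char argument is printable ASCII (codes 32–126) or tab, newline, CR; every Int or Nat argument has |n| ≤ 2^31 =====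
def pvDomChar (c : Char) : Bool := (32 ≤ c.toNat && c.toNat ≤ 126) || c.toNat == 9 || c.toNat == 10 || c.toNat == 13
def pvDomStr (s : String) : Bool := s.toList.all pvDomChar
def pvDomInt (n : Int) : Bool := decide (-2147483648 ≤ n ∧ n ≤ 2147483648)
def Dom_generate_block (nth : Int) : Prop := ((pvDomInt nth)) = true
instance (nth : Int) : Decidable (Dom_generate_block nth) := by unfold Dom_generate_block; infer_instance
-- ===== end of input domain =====

-- B computes the containing block's corner arithmetically from nth and generates its nine
-- cells directly, instead of building all nine blocks and scanning them (simpler).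


-- ===== PORT A =====
-- block_rule(n): append i, i+9, i+18 for i in range(n, n+3), then sorted
def block_rule (n : Int) : List Int :=
  let array := (PySem.List.pyRange n (n + 3) 1).foldl
    (fun arr i => arr ++ [i] ++ [i + 9] ++ [i + 18]) []
  PySem.List.sorted array (fun x => x) false

-- first sub_block containing nth → sorted(sub_block); falling off the loop → None
def gb_scan (nth : Int) : List (List Int) → Option (List Int)
  | [] => none
  | sub_block :: rest =>
      if nth ∈ sub_block then some (PySem.List.sorted sub_block (fun x => x) false)
      else gb_scan nth rest

def generate_block (nth : Int) : Option (List Int) :=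
  let all_block := (PySem.List.pyRange 0 7 3).foldl (fun acc i => acc ++ [block_rule i]) []
  let all_block := (PySem.List.pyRange 27 34 3).foldl (fun acc i => acc ++ [block_rule i]) all_block
  let all_block := (PySem.List.pyRange 54 61 3).foldl (fun acc i => acc ++ [block_rule i]) all_block
  gb_scan nth all_block

-- ===== PORT B =====
def generate_block_alt (nth : Int) : Option (List Int) :=
  if 0 ≤ nth ∧ nth ≤ 80 then
    let r := PySem.Int.floordiv nth 9
    let c := PySem.Int.mod nth 9
    let corner := (PySem.Int.floordiv r 3) * 27 + (PySem.Int.floordiv c 3) * 3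
    let cells := (PySem.List.pyRange corner (corner + 3) 1).foldl
      (fun acc i => acc ++ [i, i + 9, i + 18]) []
    some (PySem.List.sorted cells (fun x => x) false)
  else none

-- ===== PRECONDITION & SPEC =====
def Spec_generate_block (nth : Int) (out : Option (List Int)) : Prop := out = generate_block_alt nth
instance (nth : Int) (out : Option (List Int)) : Decidable (Spec_generate_block nth out) := by unfold Spec_generate_block; infer_instance

-- ===== CLAIM (what is proved, stated in full; the proofs are below) =====
def Claim_equal_generate_block : Prop := ∀ (nth : Int), Dom_generate_block nth → Spec_generate_block nth (generate_block nth)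

-- ===== LEMMAS AND PROOFS =====

-- the nine blocks A builds, as literals
theorem gb_all_block_eval :
    ((PySem.List.pyRange 54 61 3).foldl (fun acc i => acc ++ [block_rule i])
      ((PySem.List.pyRange 27 34 3).foldl (fun acc i => acc ++ [block_rule i])
        ((PySem.List.pyRange 0 7 3).foldl (fun acc i => acc ++ [block_rule i]) []))) =
    [[0,1,2,9,10,11,18,19,20],[3,4,5,12,13,14,21,22,23],[6,7,8,15,16,17,24,25,26],
     [27,28,29,36,37,38,45,46,47],[30,31,32,39,40,41,48,49,50],[33,34,35,42,43,44,51,52,53],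
     [54,55,56,63,64,65,72,73,74],[57,58,59,66,67,68,75,76,77],[60,61,62,69,70,71,78,79,80]] := by
  decide

-- both sides agree on every in-range index (81 closed cases, against the evaluated blocks)
theorem gb_agree_inrange :
    ∀ k : Fin 81, gb_scan ((k : Nat) : Int)
      [[0,1,2,9,10,11,18,19,20],[3,4,5,12,13,14,21,22,23],[6,7,8,15,16,17,24,25,26],
       [27,28,29,36,37,38,45,46,47],[30,31,32,39,40,41,48,49,50],[33,34,35,42,43,44,51,52,53],
       [54,55,56,63,64,65,72,73,74],[57,58,59,66,67,68,75,76,77],[60,61,62,69,70,71,78,79,80]]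
      = generate_block_alt ((k : Nat) : Int) := by
  decide

-- scanning a list of blocks none of which contains nth yields None
theorem gb_scan_none (nth : Int) (Ls : List (List Int)) (h : ∀ L ∈ Ls, nth ∉ L) :
    gb_scan nth Ls = none := by
  induction Ls with
  | nil => rfl
  | cons hd tl ih =>
      unfold gb_scan
      rw [if_neg (h hd (List.mem_cons_self))]
      exact ih (fun L hL => h L (List.mem_cons_of_mem _ hL))

-- ===== VERDICT (by name: the statement is the Claim_ definition above) =====
theorem generate_block_spec : Claim_equal_generate_block := by
  intro nth _
  unfold Spec_generate_block
  by_cases h : 0 ≤ nth ∧ nth ≤ 80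
  · obtain ⟨h0, h80⟩ := h
    have hk : nth.toNat < 81 := by omega
    have hs := gb_agree_inrange ⟨nth.toNat, hk⟩
    have hA : generate_block nth = gb_scan nth _ := rfl
    rw [hA, gb_all_block_eval]
    simpa [Int.toNat_of_nonneg h0] using hs
  · have hA : generate_block nth = none := by
      show gb_scan nth _ = none
      rw [gb_all_block_eval]
      apply gb_scan_none
      intro L hL
      simp only [List.mem_cons, List.not_mem_nil, or_false] at hL
      rcases hL with rfl|rfl|rfl|rfl|rfl|rfl|rfl|rfl|rfl <;>
        · intro hmem
          simp only [List.mem_cons, List.not_mem_nil, or_false] at hmem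
          omega
    have hB : generate_block_alt nth = none := by
      unfold generate_block_alt
      rw [if_neg h]
    rw [hA, hB]
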